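-- pv_equiv track=rewrite | github.com/JMSchietekat/advent-of-code | 2021/day_1.py | window_sum
-- ===== SOURCE A (Python) =====
-- def window_sum(arr, window_size, start_index):
--     assert window_size > 0, "Window size must be at least 1"
--     assert window_size <= len(arr), "The maximium window size must be smaller or equal to the array lenght."
--
--     if window_size > 1:
--         return arr[start_index - window_size - 1] + window_sum(arr, window_size - 2, start_index)
--     if window_size == 1:
--         return arr[start_index]
--     else:
--         return 0
-- ===== SOURCE B (Python) =====
-- def window_sum(arr, window_size, start_index):
--     assert window_size > 0, "Window size must be at least 1"
--     assert window_size <= len(arr), "The maximium window size must be smaller or equal to the array lenght."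
--     return arr[start_index] + sum(arr[start_index - k - 1] for k in range(3, window_size + 1, 2))
-- ===== Notes on version B (the rewrite author's own statement) =====
-- stated objective: idiomatic
-- what changed: Replaces the two-at-a-time recursion by a single closed-form sum over range(3, window_size+1, 2), eliminating recursion and the dead 'return 0' branch.
import Mathlib
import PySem

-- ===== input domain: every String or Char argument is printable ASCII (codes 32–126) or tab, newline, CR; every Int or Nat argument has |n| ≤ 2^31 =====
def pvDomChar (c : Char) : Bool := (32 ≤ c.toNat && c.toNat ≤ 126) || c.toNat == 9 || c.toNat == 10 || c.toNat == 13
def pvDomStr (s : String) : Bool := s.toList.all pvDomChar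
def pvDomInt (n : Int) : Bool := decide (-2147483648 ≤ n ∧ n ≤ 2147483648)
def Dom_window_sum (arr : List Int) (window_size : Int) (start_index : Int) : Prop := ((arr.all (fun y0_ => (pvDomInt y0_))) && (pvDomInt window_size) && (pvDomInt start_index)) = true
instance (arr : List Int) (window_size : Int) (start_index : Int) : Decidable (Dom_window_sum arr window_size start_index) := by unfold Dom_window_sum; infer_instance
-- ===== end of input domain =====

-- B replaces the two-at-a-time recursion by a direct sum over range(3, window_size+1, 2) (idiomatic, same cost).

-- ===== PORT A =====
-- A's asserts and index errors are excluded by Pre_window_sum; pyGetD is exact under InRange.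
def window_sum (arr : List Int) (window_size : Int) (start_index : Int) : Int :=
  if window_size > 1 then
    PySem.List.pyGetD arr (start_index - window_size - 1) 0 +
      window_sum arr (window_size - 2) start_index
  else if window_size = 1 then
    PySem.List.pyGetD arr start_index 0
  else 0
termination_by window_size.toNat
decreasing_by omega

-- ===== PORT B =====
def window_sum_alt (arr : List Int) (window_size : Int) (start_index : Int) : Int :=
  PySem.List.pyGetD arr start_index 0 +
    (PySem.List.pyRange 3 (window_size + 1) 2).foldl
      (fun acc k => acc + PySem.List.pyGetD arr (start_index - k - 1) 0) 0

-- ===== PRECONDITION & SPEC =====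
-- Pre_: exactly where Python A returns — odd window_size in [1, len(arr)] (even sizes recurse to 0 and
-- fail the first assert), start_index a valid Python index, and for window_size ≥ 3 all accessed
-- indices start_index-k-1 (odd k from 3 to window_size; extremes suffice) valid Python indices.
def Pre_window_sum (arr : List Int) (window_size : Int) (start_index : Int) : Prop :=
  window_size % 2 = 1 ∧ 1 ≤ window_size ∧ window_size ≤ arr.length ∧
  PySem.Raise.InRange arr.length start_index ∧
  (3 ≤ window_size →
    PySem.Raise.InRange arr.length (start_index - window_size - 1) ∧
    PySem.Raise.InRange arr.length (start_index - 4))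
instance (arr : List Int) (window_size : Int) (start_index : Int) : Decidable (Pre_window_sum arr window_size start_index) := by unfold Pre_window_sum; infer_instance

def pvWitness_window_sum : List Int × Int × Int := ([1, 2, 3], 3, 2)

def Spec_window_sum (arr : List Int) (window_size : Int) (start_index : Int) (out : Int) : Prop := out = window_sum_alt arr window_size start_index
instance (arr : List Int) (window_size : Int) (start_index : Int) (out : Int) : Decidable (Spec_window_sum arr window_size start_index out) := by unfold Spec_window_sum; infer_instance

-- ===== CLAIM (what is proved, stated in full; the proofs are below) =====
def Claim_equal_window_sum : Prop := ∀ (arr : List Int) (window_size : Int) (start_index : Int), Dom_window_sum arr window_size start_index → Pre_window_sum arr window_size start_index → Spec_window_sum arr window_size start_index (window_sum arr window_size start_index)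

-- ===== LEMMAS AND PROOFS =====

-- range(3, (2m+1)+1, 2) enumerated
lemma pyRange_step_two (m : Nat) :
    PySem.List.pyRange 3 (2 * (m : Int) + 1 + 1) 2 =
      List.map (fun k : Nat => (3 : Int) + 2 * (k : Int)) (List.range m) := by
  rw [PySem.List.pyRange_of_pos _ _ (by norm_num)]
  congr 1
  split_ifs with h
  · have hc : ((2 * (m : Int) + 1 + 1 - 3 + 2 - 1) / 2).toNat = m := by omega
    rw [hc]
  · have hm : m = 0 := by omega
    rw [hm]

lemma window_sum_key (arr : List Int) (s : Int) (m : Nat) :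
    window_sum arr (2 * (m : Int) + 1) s = window_sum_alt arr (2 * (m : Int) + 1) s := by
  induction m with
  | zero =>
    rw [window_sum, window_sum_alt, pyRange_step_two 0]
    norm_num
  | succ n ih =>
    rw [window_sum]
    have h1 : (2 * ((n + 1 : Nat) : Int) + 1) > 1 := by push_cast; omega
    rw [if_pos h1]
    have h2 : 2 * ((n + 1 : Nat) : Int) + 1 - 2 = 2 * (n : Int) + 1 := by push_cast; ring
    rw [h2, ih]
    rw [window_sum_alt, window_sum_alt]
    rw [pyRange_step_two (n + 1), pyRange_step_two n, List.range_succ, List.map_append,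
      List.foldl_append]
    simp only [List.map_cons, List.map_nil, List.foldl_cons, List.foldl_nil]
    have hidx : s - (2 * ((n + 1 : Nat) : Int) + 1) - 1 = s - (3 + 2 * (n : Int)) - 1 := by
      push_cast; ring
    rw [hidx]
    ring

-- ===== VERDICT (by name: the statement is the Claim_ definition above) =====
theorem window_sum_spec : Claim_equal_window_sum := by
  intro arr w s _ hpre
  unfold Spec_window_sum
  obtain ⟨hodd, hge, -, -, -⟩ := hpre
  obtain ⟨m, hm⟩ : ∃ m : Nat, w = 2 * (m : Int) + 1 := ⟨((w - 1) / 2).toNat, by omega⟩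
  subst hm
  exact window_sum_key arr s m
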